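-- pv_equiv track=rewrite | github.com/Singhanji/python-DSA | advance_DSA/modulo/number_mod_p.py | solve
-- ===== SOURCE A (Python) =====
-- def solve(A, p):
--     n = len(A)
--     res = 0
--     x = 1
--     for i in range(n-1,-1,-1):
--         d = A[i] % p
--         res = (res + (d * x) % p) % p
--         x = (x * 10) % p
--
--     return res
-- ===== SOURCE B (Python) =====
-- def solve(A, p):
--     # Left-to-right Horner scheme: one scaled accumulator, no power-of-ten register.
--     res = 0
--     for d in A:
--         res = (res * 10 + d) % p
--     return res
-- ===== Notes on version B (the rewrite author's own statement) =====
-- stated objective: simpler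
-- what changed: Replaces A's backward place-value loop (reversed index range, digit reduced mod p, explicit power-of-ten register, three % operations per step) with a forward Horner scheme threading a single scaled accumulator res = (res*10 + d) % p (one % per step).
import Mathlib
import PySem

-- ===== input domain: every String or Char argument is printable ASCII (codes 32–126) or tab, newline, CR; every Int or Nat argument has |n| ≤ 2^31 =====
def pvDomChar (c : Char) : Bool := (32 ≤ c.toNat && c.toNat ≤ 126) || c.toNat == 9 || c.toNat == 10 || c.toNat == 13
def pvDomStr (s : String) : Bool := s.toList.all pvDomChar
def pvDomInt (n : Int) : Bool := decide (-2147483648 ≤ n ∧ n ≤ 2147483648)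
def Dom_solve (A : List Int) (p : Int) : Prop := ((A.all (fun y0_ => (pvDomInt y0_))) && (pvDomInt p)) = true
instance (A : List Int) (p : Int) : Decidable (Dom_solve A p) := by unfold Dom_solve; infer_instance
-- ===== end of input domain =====

-- B replaces A's backward place-value loop (explicit power-of-ten register) with a
-- forward Horner scheme threading a single scaled accumulator; same O(n) cost, simpler state.

-- ===== PORT A =====
-- Loop 'for i in range(n-1,-1,-1)' over state (res, x); A[i] is always in range on this
-- index set, so pyGetD with default 0 is exact here.
def solve (A : List Int) (p : Int) : Int :=
  let n : Int := A.length
  let st := (PySem.List.pyRange (n - 1) (-1) (-1)).foldl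
    (fun (s : Int × Int) i =>
      let d := PySem.Int.mod (PySem.List.pyGetD A i 0) p
      (PySem.Int.mod (s.1 + PySem.Int.mod (d * s.2) p) p, PySem.Int.mod (s.2 * 10) p))
    (0, 1)
  st.1

-- ===== PORT B =====
def solve_alt (A : List Int) (p : Int) : Int :=
  A.foldl (fun res d => PySem.Int.mod (res * 10 + d) p) 0

-- ===== PRECONDITION & SPEC =====
-- Pre_ excludes exactly the inputs where A raises ZeroDivisionError ('% 0' with a
-- nonempty list); A returns on everything else.
def Pre_solve (A : List Int) (p : Int) : Prop := A = [] ∨ p ≠ 0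
instance (A : List Int) (p : Int) : Decidable (Pre_solve A p) := by unfold Pre_solve; infer_instance
def pvWitness_solve : List Int × Int := ([3, 1, 4], 7)

def Spec_solve (A : List Int) (p : Int) (out : Int) : Prop := out = solve_alt A p
instance (A : List Int) (p : Int) (out : Int) : Decidable (Spec_solve A p out) := by unfold Spec_solve; infer_instance

-- ===== CLAIM (what is proved, stated in full; the proofs are below) =====
def Claim_equal_solve : Prop := ∀ (A : List Int) (p : Int), Dom_solve A p → Pre_solve A p → Spec_solve A p (solve A p)

-- ===== LEMMAS AND PROOFS =====

-- value of a digit list read least-significant-first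
def pvRevnum : List Int → Int
  | [] => 0
  | d :: L => d + 10 * pvRevnum L

-- fmod only depends on the residue class
theorem pv_fmod_congr (p a b : Int) (h : a % p = b % p) : a.fmod p = b.fmod p := by
  obtain ⟨c, hc⟩ := Int.ModEq.dvd (show a ≡ b [ZMOD p] from h)
  have hb : b = a + p * c := by linarith
  rw [hb, Int.add_mul_fmod_self_left]

theorem pv_fmod_emod (a p : Int) : a.fmod p % p = a % p := by
  conv_rhs => rw [← Int.fmod_add_mul_fdiv a p]
  rw [Int.add_mul_emod_self_left]

-- B side: Horner fold from a canonical accumulator computes fmod of the plain Horner value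
theorem pv_horner (p : Int) (L : List Int) : ∀ r : Int,
    L.foldl (fun res d => (res * 10 + d).fmod p) (r.fmod p)
      = (L.foldl (fun a d => a * 10 + d) r).fmod p := by
  induction L with
  | nil => intro r; rfl
  | cons d L ih =>
    intro r
    have h : ((r.fmod p) * 10 + d).fmod p = (r * 10 + d).fmod p := by
      apply pv_fmod_congr
      rw [Int.add_emod, Int.mul_emod]
      simp only [pv_fmod_emod]
      rw [← Int.mul_emod, ← Int.add_emod]
    simpa [h] using ih (r * 10 + d)

-- A side: A's loop over the reversed digit list, with canonical res and any x ≡ X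
theorem pv_aloop (p : Int) (L : List Int) : ∀ r x X : Int, x % p = X % p →
    (L.foldl (fun (s : Int × Int) d =>
        ((s.1 + ((d.fmod p) * s.2).fmod p).fmod p, (s.2 * 10).fmod p)) (r.fmod p, x)).1
      = (r + X * pvRevnum L).fmod p := by
  induction L with
  | nil =>
    intro r x X _
    simp [pvRevnum]
  | cons d L ih =>
    intro r x X hx
    have hres : ((r.fmod p) + ((d.fmod p) * x).fmod p).fmod p = (r + d * X).fmod p := by
      apply pv_fmod_congr
      rw [Int.add_emod]
      simp only [pv_fmod_emod]
      rw [Int.mul_emod]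
      simp only [pv_fmod_emod]
      rw [hx, ← Int.mul_emod, ← Int.add_emod]
    have hx' : (x * 10).fmod p % p = (X * 10) % p := by
      rw [pv_fmod_emod, Int.mul_emod, hx, ← Int.mul_emod]
    have := ih (r + d * X) ((x * 10).fmod p) (X * 10) hx'
    simp only [List.foldl_cons, hres] at *
    rw [this, pvRevnum]
    ring_nf

-- plain Horner value = value of the reversed list read least-significant-first
theorem pv_revnum_append (M : List Int) (d : Int) :
    pvRevnum (M ++ [d]) = pvRevnum M + d * 10 ^ M.length := by
  induction M with
  | nil => simp [pvRevnum]
  | cons e M ih => simp [pvRevnum, ih]; ring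

theorem pv_horner_revnum (L : List Int) : ∀ r : Int,
    L.foldl (fun a d => a * 10 + d) r = r * 10 ^ L.length + pvRevnum L.reverse := by
  induction L with
  | nil => intro r; simp [pvRevnum]
  | cons d L ih =>
    intro r
    simp only [List.foldl_cons, ih, List.reverse_cons, pv_revnum_append,
      List.length_reverse, List.length_cons]
    ring

-- ===== VERDICT (by name: the statement is the Claim_ definition above) =====
theorem solve_spec : Claim_equal_solve := by
  intro A p _ hpre
  unfold Spec_solve solve solve_alt
  rcases hpre with h | hp
  · subst h; rfl
  · simp only [PySem.Int.mod]
    rw [PySem.List.pyRange_neg_one_eq_reverse]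
    simp only [neg_add_cancel, sub_add_cancel]
    rw [← List.foldl_map (f := fun i => PySem.List.pyGetD A i 0)
      (g := fun (s : Int × Int) d =>
        ((s.1 + ((d.fmod p) * s.2).fmod p).fmod p, (s.2 * 10).fmod p))]
    rw [List.map_reverse, PySem.List.map_pyGetD_pyRange_zero']
    have h0 : (0 : Int) = (0 : Int).fmod p := by simp
    have hA := pv_aloop p A.reverse 0 1 1 rfl
    rw [h0, hA, pv_horner p A 0, pv_horner_revnum]
    simp
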